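-- pv_equiv track=rewrite | github.com/rs1017/rs1017.github.io | generator/generate.py | remove_yaml_frontmatter
-- ===== SOURCE A (Python) =====
-- def remove_yaml_frontmatter(content: str) -> str:
--     """
--     YAML frontmatter 제거 (콘텐츠 파일용)
--     Jekyll이 HTML로 변환하지 않도록 frontmatter를 제거합니다.
--     """
--     lines = content.strip().split('\n')
--
--     # frontmatter가 없으면 그대로 반환
--     if not lines or lines[0].strip() != '---':
--         return content
--
--     # 닫는 --- 찾기
--     closing_idx = -1
--     for i, line in enumerate(lines[1:], 1):
--         if line.strip() == '---':
--             closing_idx = i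
--             break
--
--     # 닫는 ---가 없으면 그대로 반환
--     if closing_idx == -1:
--         return content
--
--     # frontmatter 제거하고 나머지 반환
--     remaining = '\n'.join(lines[closing_idx + 1:]).strip()
--     return remaining
-- ===== SOURCE B (Python) =====
-- def remove_yaml_frontmatter(content: str) -> str:
--     # One-pass state machine: 0 = expecting the opening '---', 1 = inside
--     # frontmatter, 2 = past the closing '---' (collecting body lines).
--     state = 0
--     body = []
--     for line in content.strip().split('\n'):
--         if state == 2:
--             body.append(line)
--         elif line.strip() == '---':
--             state += 1
--         elif state == 0:
--             return content
--     if state < 2: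
--         return content
--     return '\n'.join(body).strip()
-- ===== Notes on version B (the rewrite author's own statement) =====
-- stated objective: alternative
-- what changed: Replaces A's find-the-closing-index-then-slice-and-join approach with a single-pass three-state machine that accumulates body lines after the closing delimiter, never computing indices or slicing.
import Mathlib
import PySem

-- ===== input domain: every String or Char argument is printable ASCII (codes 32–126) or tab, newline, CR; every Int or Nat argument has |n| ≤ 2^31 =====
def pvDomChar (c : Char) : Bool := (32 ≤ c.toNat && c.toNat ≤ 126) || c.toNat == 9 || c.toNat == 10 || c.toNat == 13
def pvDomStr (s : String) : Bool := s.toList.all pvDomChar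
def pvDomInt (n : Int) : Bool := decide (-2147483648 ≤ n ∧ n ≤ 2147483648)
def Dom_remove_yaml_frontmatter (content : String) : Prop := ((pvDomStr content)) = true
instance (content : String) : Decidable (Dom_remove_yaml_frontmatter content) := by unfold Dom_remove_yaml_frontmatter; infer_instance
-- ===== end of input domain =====

-- B replaces A's find-closing-index-then-slice approach by a one-pass three-state machine
-- accumulating body lines; same result, proved equal on all inputs.

-- ===== PORT A =====
-- the `for i, line in enumerate(lines[1:], 1): … break` loop, as structural recursion
def pvFindClosing : List String → Int → Int
  | [], _ => -1
  | l :: rest, i => if PySem.Str.strip l = "---" then i else pvFindClosing rest (i + 1)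

-- A's logic after `lines = content.strip().split('\n')` (split? is never none: the separator "\n" is nonempty)
def pvBodyA (content : String) : List String → String
  | [] => content
  | l0 :: rest =>
    if PySem.Str.strip l0 ≠ "---" then content
    else
      let closing := pvFindClosing (PySem.List.slice (l0 :: rest) (some 1) none) 1
      if closing = -1 then content
      else PySem.Str.strip (PySem.Str.join "\n" (PySem.List.slice (l0 :: rest) (some (closing + 1)) none))

def remove_yaml_frontmatter (content : String) : String :=
  pvBodyA content ((PySem.Str.split? (PySem.Str.strip content) "\n").getD [])

-- ===== PORT B =====
-- B's for-loop: state 0 = expecting opening '---', 1 = inside frontmatter, 2 = collecting body;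
-- `none` stands for B's early/late `return content`
def pvLoopB : List String → Nat → List String → Option (List String)
  | [], st, body => if st < 2 then none else some body
  | l :: rest, st, body =>
    if st = 2 then pvLoopB rest st (body ++ [l])
    else if PySem.Str.strip l = "---" then pvLoopB rest (st + 1) body
    else if st = 0 then none
    else pvLoopB rest st body

-- B's logic after the same split
def pvBodyB (content : String) (lines : List String) : String :=
  match pvLoopB lines 0 [] with
  | none => content
  | some body => PySem.Str.strip (PySem.Str.join "\n" body)

def remove_yaml_frontmatter_alt (content : String) : String :=
  pvBodyB content ((PySem.Str.split? (PySem.Str.strip content) "\n").getD [])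

-- ===== PRECONDITION & SPEC =====
def Spec_remove_yaml_frontmatter (content : String) (out : String) : Prop := out = remove_yaml_frontmatter_alt content
instance (content : String) (out : String) : Decidable (Spec_remove_yaml_frontmatter content out) := by unfold Spec_remove_yaml_frontmatter; infer_instance

-- ===== CLAIM (what is proved, stated in full; the proofs are below) =====
def Claim_equal_remove_yaml_frontmatter : Prop := ∀ (content : String), Dom_remove_yaml_frontmatter content → Spec_remove_yaml_frontmatter content (remove_yaml_frontmatter content)

-- ===== LEMMAS AND PROOFS =====

-- once in state 2, B's loop just appends every remaining line
lemma pvLoopB_two (xs : List String) (body : List String) :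
    pvLoopB xs 2 body = some (body ++ xs) := by
  induction xs generalizing body with
  | nil => simp [pvLoopB]
  | cons l rest ih => simp [pvLoopB, ih]

-- in state 1, B's loop succeeds exactly when A's break loop finds a closing
-- delimiter, and then returns the lines after it
lemma pvLoopB_one (xs : List String) (i : Int) :
    (pvFindClosing xs i = -1 ∧ pvLoopB xs 1 [] = none) ∨
    (∃ n : Nat, pvFindClosing xs i = i + n ∧ pvLoopB xs 1 [] = some (xs.drop (n + 1))) := by
  induction xs generalizing i with
  | nil => exact Or.inl ⟨rfl, rfl⟩
  | cons l rest ih =>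
    by_cases h : PySem.Str.strip l = "---"
    · refine Or.inr ⟨0, ?_, ?_⟩
      · simp [pvFindClosing, h]
      · simp [pvLoopB, h, pvLoopB_two]
    · rcases ih (i + 1) with ⟨h1, h2⟩ | ⟨n, h1, h2⟩
      · exact Or.inl ⟨by simpa [pvFindClosing, h] using h1, by simpa [pvLoopB, h] using h2⟩
      · refine Or.inr ⟨n + 1, ?_, ?_⟩
        · simp only [pvFindClosing, h, if_false]; rw [h1]; push_cast; ring
        · simpa [pvLoopB, h] using h2
lemma pvBody_eq (content : String) (lines : List String) :
    pvBodyA content lines = pvBodyB content lines := by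
  cases lines with
  | nil => simp [pvBodyA, pvBodyB, pvLoopB]
  | cons l0 rest =>
    by_cases h0 : PySem.Str.strip l0 = "---"
    · simp only [pvBodyA, h0, ne_eq, not_true_eq_false, if_false]
      rw [PySem.List.slice_from_one, List.tail_cons]
      have hstep : pvLoopB (l0 :: rest) 0 [] = pvLoopB rest 1 [] := by simp [pvLoopB, h0]
      rcases pvLoopB_one rest 1 with ⟨h1, h2⟩ | ⟨n, h1, h2⟩
      · rw [h1]; simp only [pvBodyB]; rw [hstep, h2]; simp
      · rw [h1]; simp only [pvBodyB]; rw [hstep, h2]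
        rw [if_neg (by omega : ¬(1 : Int) + n = -1)]
        have : (1 : Int) + n + 1 = ((n + 2 : Nat) : Int) := by push_cast; ring
        rw [this, PySem.List.slice_from_natCast]
        simp
    · have hstep : pvLoopB (l0 :: rest) 0 [] = none := by simp [pvLoopB, h0]
      simp [pvBodyA, pvBodyB, h0, hstep]

-- ===== VERDICT (by name: the statement is the Claim_ definition above) =====
theorem remove_yaml_frontmatter_spec : Claim_equal_remove_yaml_frontmatter := by
  intro content _
  exact pvBody_eq content _
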